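-- pv_equiv track=rewrite | github.com/krkawzq/PerturbLab | perturblab/types/math/_bipartite_graph.py | _infer_shape_from_edges
-- ===== SOURCE A (Python) =====
-- def _infer_shape_from_edges(
--     edges: list[tuple[int, int]],
-- ) -> tuple[int, int]:
--     """Infer graph shape from edge list.
--
--     Args:
--         edges: List of (source, target) index pairs.
--
--     Returns:
--         tuple[int, int]: Shape (n_source, n_target).
--     """
--     if not edges:
--         return (0, 0)
--
--     sources = [edge[0] for edge in edges]
--     targets = [edge[1] for edge in edges]
--
--     if any(s < 0 for s in sources) or any(t < 0 for t in targets):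
--         raise ValueError("Edge indices must be non-negative")
--
--     n_source = max(sources) + 1
--     n_target = max(targets) + 1
--     return n_source, n_target
-- ===== SOURCE B (Python) =====
-- def _infer_shape_from_edges(
--     edges: list[tuple[int, int]],
-- ) -> tuple[int, int]:
--     """Infer graph shape from edge list in one accumulating pass."""
--     if not edges:
--         return (0, 0)
--     (ms, mt), rest = edges[0], edges[1:]
--     if ms < 0 or mt < 0:
--         raise ValueError("Edge indices must be non-negative")
--     for s, t in rest:
--         if s < 0 or t < 0:
--             raise ValueError("Edge indices must be non-negative")
--         if s > ms:
--             ms = s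
--         if t > mt:
--             mt = t
--     return ms + 1, mt + 1
-- ===== Notes on version B (the rewrite author's own statement) =====
-- stated objective: simpler
-- what changed: Replaces the two comprehension-built lists, two any-scans and two max calls by a single pass that carries running maxima and checks negativity per edge.
import Mathlib
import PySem

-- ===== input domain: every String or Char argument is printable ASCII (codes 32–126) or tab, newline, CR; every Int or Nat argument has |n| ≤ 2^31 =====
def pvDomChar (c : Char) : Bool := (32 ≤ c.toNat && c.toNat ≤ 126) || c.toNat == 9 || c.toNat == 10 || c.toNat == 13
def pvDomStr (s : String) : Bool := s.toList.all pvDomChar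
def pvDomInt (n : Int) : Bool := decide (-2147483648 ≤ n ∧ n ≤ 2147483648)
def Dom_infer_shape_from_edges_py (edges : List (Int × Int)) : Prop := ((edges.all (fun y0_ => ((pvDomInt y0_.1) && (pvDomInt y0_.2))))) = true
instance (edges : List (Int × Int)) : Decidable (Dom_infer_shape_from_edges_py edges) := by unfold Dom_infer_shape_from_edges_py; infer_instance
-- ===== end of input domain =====

-- B merges A's two comprehensions, two any-scans and two max calls into one
-- accumulating pass; equal return value on all non-raising inputs (Pre_).

-- ===== PORT A =====
def infer_shape_from_edges_py (edges : List (Int × Int)) : Int × Int :=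
  if edges = [] then (0, 0)
  else
    let sources := edges.map (fun e => e.1)
    let targets := edges.map (fun e => e.2)
    -- the 'any negative → raise ValueError' path is excluded by Pre_
    match PySem.List.max? sources (fun x => x), PySem.List.max? targets (fun x => x) with
    | some ms, some mt => (ms + 1, mt + 1)
    | _, _ => (0, 0)  -- unreachable: both lists are nonempty

-- ===== PORT B =====
def pvAltLoop (rest : List (Int × Int)) (ms mt : Int) : Int × Int :=
  match rest with
  | [] => (ms + 1, mt + 1)
  | (s, t) :: rs => pvAltLoop rs (if s > ms then s else ms) (if t > mt then t else mt)

def infer_shape_from_edges_py_alt (edges : List (Int × Int)) : Int × Int :=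
  match edges with
  | [] => (0, 0)
  | (s, t) :: rest => pvAltLoop rest s t

-- ===== PRECONDITION & SPEC =====
-- Pre_ excludes exactly the inputs containing a negative index, on which A raises ValueError.
def Pre_infer_shape_from_edges_py (edges : List (Int × Int)) : Prop :=
  ∀ e ∈ edges, 0 ≤ e.1 ∧ 0 ≤ e.2
instance (edges : List (Int × Int)) : Decidable (Pre_infer_shape_from_edges_py edges) := by unfold Pre_infer_shape_from_edges_py; infer_instance
def pvWitness_infer_shape_from_edges_py : (List (Int × Int)) := [(2, 0), (1, 3)]
def Spec_infer_shape_from_edges_py (edges : List (Int × Int)) (out : Int × Int) : Prop := out = infer_shape_from_edges_py_alt edges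
instance (edges : List (Int × Int)) (out : Int × Int) : Decidable (Spec_infer_shape_from_edges_py edges out) := by unfold Spec_infer_shape_from_edges_py; infer_instance

-- ===== CLAIM (what is proved, stated in full; the proofs are below) =====
def Claim_equal_infer_shape_from_edges_py : Prop := ∀ (edges : List (Int × Int)), Dom_infer_shape_from_edges_py edges → Pre_infer_shape_from_edges_py edges → Spec_infer_shape_from_edges_py edges (infer_shape_from_edges_py edges)

-- ===== LEMMAS AND PROOFS =====
theorem pvIfGtEqMax (a b : Int) : (if b > a then b else a) = max a b := by
  rw [max_def]; split_ifs <;> omega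

theorem pvAltLoop_eq_foldl (rest : List (Int × Int)) (ms mt : Int) :
    pvAltLoop rest ms mt =
      ((rest.map (fun e => e.1)).foldl max ms + 1, (rest.map (fun e => e.2)).foldl max mt + 1) := by
  induction rest generalizing ms mt with
  | nil => simp [pvAltLoop]
  | cons e rs ih =>
    obtain ⟨s, t⟩ := e
    simp only [pvAltLoop, List.map_cons, List.foldl_cons, pvIfGtEqMax, ih]

-- ===== VERDICT (by name: the statement is the Claim_ definition above) =====
theorem infer_shape_from_edges_py_spec : Claim_equal_infer_shape_from_edges_py := by
  intro edges _ _
  unfold Spec_infer_shape_from_edges_py infer_shape_from_edges_py infer_shape_from_edges_py_alt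
  match edges with
  | [] => simp
  | (s, t) :: rest =>
    simp only [List.map_cons, PySem.List.max?_id_cons, if_neg (List.cons_ne_nil _ _)]
    rw [pvAltLoop_eq_foldl]
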